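-- pv_equiv track=rewrite | github.com/koa73/P41_Parser | src/drawio_processor.py | _evaluate_complex_pattern
-- ===== SOURCE A (Python) =====
-- def _evaluate_complex_pattern(pattern: str, style: str, value: str) -> bool:
--     """
--     Оценка сложного паттерна с логическими операторами
--
--     :param pattern: паттерн с логическими операторами
--     :param style: стиль элемента
--     :param value: значение элемента
--     :return: True если паттерн соответствует
--     """
--     search_text = (style + ' ' + value).lower()
--
--     # Разбиваем паттерн по ИЛИ (|)
--     or_parts = pattern.split('|')
--
--     for or_part in or_parts:
--         # Проверяем части на наличие НЕ (!)
--         and_parts = []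
--         current_part = ""
--
--         i = 0
--         while i < len(or_part):
--             if or_part[i] == '!':
--                 # Сохраняем предыдущую часть
--                 if current_part.strip():
--                     and_parts.append(('AND', current_part.strip()))
--                 current_part = ""
--
--                 # Пропускаем ! и собираем следующую часть
--                 i += 1
--                 negated_part = ""
--                 while i < len(or_part) and or_part[i] != ';':
--                     negated_part += or_part[i]
--                     i += 1
--                 and_parts.append(('NOT', negated_part.strip()))
--             elif or_part[i] == ';':
--                 if current_part.strip():
--                     and_parts.append(('AND', current_part.strip()))
--                     current_part = ""
--                 i += 1
--             else:
--                 current_part += or_part[i]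
--                 i += 1
--
--         # Добавляем последнюю часть
--         if current_part.strip():
--             and_parts.append(('AND', current_part.strip()))
--
--         # Проверяем условия И и НЕ
--         or_part_match = True
--         for op, part in and_parts:
--             if op == 'AND':
--                 if part and part.lower() not in search_text:
--                     or_part_match = False
--                     break
--             elif op == 'NOT':
--                 if part and part.lower() in search_text:
--                     or_part_match = False
--                     break
--
--         if or_part_match:
--             return True
--
--     return False
-- ===== SOURCE B (Python) =====
-- def _evaluate_complex_pattern(pattern: str, style: str, value: str) -> bool:
--     search_text = (style + ' ' + value).lower()
--
--     def term_ok(chunk):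
--         left, sep, right = chunk.partition('!')
--         t = left.strip()
--         if t and t.lower() not in search_text:
--             return False
--         if sep:
--             n = right.strip()
--             if n and n.lower() in search_text:
--                 return False
--         return True
--
--     return any(all(term_ok(c) for c in part.split(';'))
--                for part in pattern.split('|'))
-- ===== Notes on version B (the rewrite author's own statement) =====
-- stated objective: simpler
-- what changed: Replaces the char-by-char index loop (with its per-character string concatenation and (op, part) accumulator list) by a direct split('|')/split(';')/partition('!') decomposition evaluated with any/all.
import Mathlib
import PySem

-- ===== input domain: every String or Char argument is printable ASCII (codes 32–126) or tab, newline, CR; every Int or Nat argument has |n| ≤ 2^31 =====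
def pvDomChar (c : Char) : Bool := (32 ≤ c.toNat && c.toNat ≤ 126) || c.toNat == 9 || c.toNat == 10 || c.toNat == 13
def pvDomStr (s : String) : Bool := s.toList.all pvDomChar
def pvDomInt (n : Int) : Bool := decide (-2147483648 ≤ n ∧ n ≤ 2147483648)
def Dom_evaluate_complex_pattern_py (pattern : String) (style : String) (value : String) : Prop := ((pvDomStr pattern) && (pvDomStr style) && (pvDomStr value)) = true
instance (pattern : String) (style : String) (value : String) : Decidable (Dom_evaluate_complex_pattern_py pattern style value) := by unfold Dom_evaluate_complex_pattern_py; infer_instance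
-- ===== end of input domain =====

-- B replaces A's char-by-char index loop and (op, part) accumulator list by a
-- split('|')/split(';')/partition('!') decomposition evaluated with any/all (objective: simpler).

-- ===== PORT A =====
-- A's inner while over or_part's characters, building and_parts; tags 'AND'/'NOT' kept as strings.
-- The inner "while i < len(or_part) and or_part[i] != ';'" collecting negated_part is the
-- takeWhile/dropWhile pair over the remaining characters (step for step: same scan).
def pvParseA : List Char → List Char → List (String × List Char) → List (String × List Char)
  | [], cur, acc =>
      -- "if current_part.strip(): and_parts.append(('AND', current_part.strip()))" after the loop
      if PySem.Chars.strip cur ≠ [] then acc ++ [("AND", PySem.Chars.strip cur)] else acc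
  | c :: rest, cur, acc =>
      if c = '!' then
        pvParseA (rest.dropWhile (· != ';')) []
          ((if PySem.Chars.strip cur ≠ [] then acc ++ [("AND", PySem.Chars.strip cur)] else acc)
            ++ [("NOT", PySem.Chars.strip (rest.takeWhile (· != ';')))])
      else if c = ';' then
        if PySem.Chars.strip cur ≠ [] then pvParseA rest [] (acc ++ [("AND", PySem.Chars.strip cur)])
        else pvParseA rest cur acc
      else pvParseA rest (cur ++ [c]) acc
  termination_by cs _ _ => cs.length
  decreasing_by
  · simpa using Nat.lt_succ_of_le (List.length_dropWhile_le _ _)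
  · simp
  · simp
  · simp

-- A's "for op, part in and_parts" loop with break (or_part_match accumulator)
def pvEvalA (st : List Char) : List (String × List Char) → Bool
  | [] => true
  | (op, part) :: rest =>
      if op = "AND" then
        if part ≠ [] ∧ PySem.Chars.isIn (PySem.Chars.lower part) st = false then false
        else pvEvalA st rest
      else if op = "NOT" then
        if part ≠ [] ∧ PySem.Chars.isIn (PySem.Chars.lower part) st = true then false
        else pvEvalA st rest
      else pvEvalA st rest

-- A's "for or_part in or_parts: … if or_part_match: return True … return False"
def pvOrLoopA (st : List Char) : List (List Char) → Bool
  | [] => false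
  | p :: rest => if pvEvalA st (pvParseA p [] []) then true else pvOrLoopA st rest

def evaluate_complex_pattern_py (pattern : String) (style : String) (value : String) : Bool :=
  -- search_text = (style + ' ' + value).lower()
  let st := PySem.Chars.lower (style.toList ++ ' ' :: value.toList)
  pvOrLoopA st (PySem.Chars.splitOn pattern.toList ['|'])

-- ===== PORT B =====
-- chunk.partition('!') ported by hand (exact for the single-character separator '!'):
-- left = chars before the first '!', sep nonempty iff '!' ∈ chunk, right = everything after it.
def pvTermOkB (st chunk : List Char) : Bool :=
  let t := PySem.Chars.strip (chunk.takeWhile (· != '!'))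
  if t ≠ [] ∧ PySem.Chars.isIn (PySem.Chars.lower t) st = false then false
  else if '!' ∈ chunk then
    let n := PySem.Chars.strip ((chunk.dropWhile (· != '!')).drop 1)
    if n ≠ [] ∧ PySem.Chars.isIn (PySem.Chars.lower n) st = true then false else true
  else true

def evaluate_complex_pattern_py_alt (pattern : String) (style : String) (value : String) : Bool :=
  let st := PySem.Chars.lower (style.toList ++ ' ' :: value.toList)
  (PySem.Chars.splitOn pattern.toList ['|']).any fun part =>
    (PySem.Chars.splitOn part [';']).all fun chunk => pvTermOkB st chunk

-- ===== PRECONDITION & SPEC =====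
def Spec_evaluate_complex_pattern_py (pattern : String) (style : String) (value : String) (out : Bool) : Prop := out = evaluate_complex_pattern_py_alt pattern style value
instance (pattern : String) (style : String) (value : String) (out : Bool) : Decidable (Spec_evaluate_complex_pattern_py pattern style value out) := by unfold Spec_evaluate_complex_pattern_py; infer_instance

-- ===== CLAIM (what is proved, stated in full; the proofs are below) =====
def Claim_equal_evaluate_complex_pattern_py : Prop := ∀ (pattern : String) (style : String) (value : String), Dom_evaluate_complex_pattern_py pattern style value → Spec_evaluate_complex_pattern_py pattern style value (evaluate_complex_pattern_py pattern style value)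

-- ===== LEMMAS AND PROOFS =====

theorem pvEvalA_append (st : List Char) (xs ys : List (String × List Char)) :
    pvEvalA st (xs ++ ys) = (pvEvalA st xs && pvEvalA st ys) := by
  induction xs with
  | nil => simp [pvEvalA]
  | cons p rest ih =>
      obtain ⟨op, part⟩ := p
      simp only [List.cons_append, pvEvalA]
      split_ifs <;> simp [ih]

theorem pvParseA_acc : ∀ (n : Nat) (cs : List Char), cs.length ≤ n →
    ∀ (cur : List Char) (acc : List (String × List Char)),
    pvParseA cs cur acc = acc ++ pvParseA cs cur [] := by
  intro n
  induction n with
  | zero =>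
      intro cs h cur acc
      have : cs = [] := by cases cs <;> simp_all
      subst this
      simp only [pvParseA]
      split_ifs <;> simp
  | succ f ih =>
      intro cs h cur acc
      cases cs with
      | nil =>
          simp only [pvParseA]
          split_ifs <;> simp
      | cons c rest =>
          simp only [pvParseA, List.nil_append]
          by_cases hbang : c = '!'
          · simp only [if_pos hbang]
            have hd : (rest.dropWhile (· != ';')).length ≤ f :=
              Nat.le_trans (List.length_dropWhile_le _ _) (by simpa using h)
            split_ifs
            · rw [ih _ hd]
              conv_rhs => rw [ih _ hd]
              simp
            · rw [ih _ hd]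
              conv_rhs => rw [ih _ hd]
              simp
          · simp only [if_neg hbang]
            have h' : rest.length ≤ f := by simpa using h
            by_cases hsemi : c = ';'
            · simp only [if_pos hsemi]
              split_ifs
              · rw [ih _ h']
                conv_rhs => rw [ih _ h']
                simp
              · exact ih _ h' cur acc
            · simp only [if_neg hsemi]
              exact ih _ h' _ acc

theorem pvIsspace_ne (c : Char) (h : PySem.Chars.isspace c = true) : c ≠ '!' ∧ c ≠ ';' := by
  constructor <;> rintro rfl <;> simp [PySem.Chars.isspace] at h

theorem pvStrip_all_space (cur : List Char) (h : PySem.Chars.strip cur = []) :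
    ∀ c ∈ cur, PySem.Chars.isspace c = true := by
  intro c hc
  rw [PySem.Chars.strip, PySem.Chars.rstrip, PySem.Chars.lstrip] at h
  have h2 : List.dropWhile PySem.Chars.isspace (List.dropWhile PySem.Chars.isspace cur).reverse = [] := by
    simpa using h
  have h3 : ∀ x ∈ (List.dropWhile PySem.Chars.isspace cur), PySem.Chars.isspace x = true := by
    intro x hx
    exact List.dropWhile_eq_nil_iff.mp h2 x (by simpa using hx)
  rcases List.mem_append.mp (by rw [List.takeWhile_append_dropWhile] ; exact hc :
      c ∈ List.takeWhile PySem.Chars.isspace cur ++ List.dropWhile PySem.Chars.isspace cur) with h4 | h4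
  · exact List.mem_takeWhile_imp h4
  · exact h3 c h4

theorem pvStrip_append_ws (cur x : List Char) (h : ∀ c ∈ cur, PySem.Chars.isspace c = true) :
    PySem.Chars.strip (cur ++ x) = PySem.Chars.strip x := by
  rw [PySem.Chars.strip, PySem.Chars.strip, PySem.Chars.lstrip, PySem.Chars.lstrip,
    List.dropWhile_append]
  simp [List.dropWhile_eq_nil_iff.mpr h]

def pvAndOk (st t : List Char) : Bool :=
  if t ≠ [] ∧ PySem.Chars.isIn (PySem.Chars.lower t) st = false then false else true

theorem pvTermOkB_no_bang (st chunk : List Char) (h : '!' ∉ chunk) :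
    pvTermOkB st chunk = pvAndOk st (PySem.Chars.strip chunk) := by
  have ht : chunk.takeWhile (· != '!') = chunk :=
    List.takeWhile_eq_self_iff.mpr (by intro c hc; simp only [bne_iff_ne, ne_eq]; rintro rfl; exact h hc)
  simp only [pvTermOkB, pvAndOk, ht, if_neg h]

theorem pvTermOkB_ws (st cur h' : List Char) (h : PySem.Chars.strip cur = []) :
    pvTermOkB st (cur ++ h') = pvTermOkB st h' := by
  have hsp := pvStrip_all_space cur h
  have hnb : ∀ c ∈ cur, (c != '!') = true := by
    intro c hc; simpa using (pvIsspace_ne c (hsp c hc)).1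
  have hmem : ('!' ∈ cur ++ h') ↔ ('!' ∈ h') := by
    constructor
    · intro hx
      rcases List.mem_append.mp hx with hx | hx
      · exact absurd (hnb _ hx) (by simp)
      · exact hx
    · intro hx; exact List.mem_append.mpr (Or.inr hx)
  have htk : (cur ++ h').takeWhile (· != '!') = cur ++ h'.takeWhile (· != '!') := by
    rw [List.takeWhile_append, if_pos]
    rw [List.takeWhile_eq_self_iff.mpr hnb]
  have hdw : (cur ++ h').dropWhile (· != '!') = h'.dropWhile (· != '!') := by
    rw [List.dropWhile_append, if_pos]
    simp [List.dropWhile_eq_nil_iff.mpr hnb]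
  simp only [pvTermOkB, htk, hdw, hmem,
    pvStrip_append_ws cur _ (fun c hc => hsp c hc)]

def pvSplit1 (sep : Char) : List Char → List (List Char)
  | [] => [[]]
  | c :: cs => if c = sep then [] :: pvSplit1 sep cs else (pvSplit1 sep cs).modifyHead (c :: ·)

theorem pvSplit1_ne_nil (sep : Char) (cs : List Char) : pvSplit1 sep cs ≠ [] := by
  cases cs with
  | nil => simp [pvSplit1]
  | cons c cs =>
      simp only [pvSplit1]
      split
      · simp
      · cases h : pvSplit1 sep cs with
        | nil => exact absurd h (pvSplit1_ne_nil sep cs)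
        | cons a t => simp

theorem pvGo_single (sep : Char) : ∀ (fuel : Nat) (l cur : List Char) (acc : List (List Char)),
    l.length < fuel →
    PySem.Chars.splitOn.go [sep] fuel l cur acc
      = acc.reverse ++ (pvSplit1 sep l).modifyHead (cur.reverse ++ ·) := by
  intro fuel
  induction fuel with
  | zero => intro l cur acc h; omega
  | succ f ih =>
    intro l cur acc h
    cases l with
    | nil => simp [PySem.Chars.splitOn.go, pvSplit1]
    | cons c rest =>
      by_cases hc : sep = c
      · subst hc
        rw [show PySem.Chars.splitOn.go [sep] (f+1) (sep :: rest) cur acc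
              = PySem.Chars.splitOn.go [sep] f rest [] (cur.reverse :: acc) by
            simp [PySem.Chars.splitOn.go, List.isPrefixOf]]
        rw [ih rest [] (cur.reverse :: acc) (by simpa using Nat.lt_of_succ_lt_succ h)]
        rcases hne : pvSplit1 sep rest with _ | ⟨a, t⟩
        · exact absurd hne (pvSplit1_ne_nil sep rest)
        · simp [pvSplit1, hne]
      · rw [show PySem.Chars.splitOn.go [sep] (f+1) (c :: rest) cur acc
              = PySem.Chars.splitOn.go [sep] f rest (c :: cur) acc by
            simp [PySem.Chars.splitOn.go, List.isPrefixOf, hc]]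
        rw [ih rest (c :: cur) acc (by simpa using Nat.lt_of_succ_lt_succ h)]
        rcases hne : pvSplit1 sep rest with _ | ⟨a, t⟩
        · exact absurd hne (pvSplit1_ne_nil sep rest)
        · simp [pvSplit1, hne, Ne.symm hc]

theorem pvSplitOn_single (sep : Char) (cs : List Char) :
    PySem.Chars.splitOn cs [sep] = pvSplit1 sep cs := by
  rw [PySem.Chars.splitOn, pvGo_single sep (cs.length + 1) cs [] [] (by omega)]
  rcases hne : pvSplit1 sep cs with _ | ⟨a, t⟩
  · exact absurd hne (pvSplit1_ne_nil sep cs)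
  · simp

theorem pvSplit1_append (sep : Char) (a r : List Char) (h : sep ∉ a) :
    pvSplit1 sep (a ++ r) = (pvSplit1 sep r).modifyHead (a ++ ·) := by
  induction a with
  | nil =>
      rcases hne : pvSplit1 sep r with _ | ⟨x, t⟩
      · exact absurd hne (pvSplit1_ne_nil sep r)
      · simp [hne]
  | cons c cs ih =>
      have hc : c ≠ sep := by simp at h; tauto
      have h' : sep ∉ cs := by simp at h; tauto
      rcases hne : pvSplit1 sep r with _ | ⟨x, t⟩
      · exact absurd hne (pvSplit1_ne_nil sep r)
      · rcases hne2 : pvSplit1 sep (cs ++ r) with _ | ⟨y, u⟩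
        · exact absurd hne2 (pvSplit1_ne_nil sep (cs ++ r))
        · have := ih h'
          rw [hne, hne2] at this
          simp at this
          simp [pvSplit1, hc, hne2, this]

theorem pvSplit1_char (sep : Char) (r : List Char) :
    pvSplit1 sep r = (r.takeWhile (· != sep)) ::
      (if sep ∈ r then pvSplit1 sep ((r.dropWhile (· != sep)).drop 1) else []) := by
  induction r with
  | nil => simp [pvSplit1]
  | cons c cs ih =>
      by_cases hc : c = sep
      · subst hc
        simp [pvSplit1]
      · rw [show pvSplit1 sep (c :: cs) = (pvSplit1 sep cs).modifyHead (c :: ·) by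
            simp [pvSplit1, hc]]
        rw [ih]
        simp [hc, Ne.symm hc]

def pvNotOk (st n : List Char) : Bool :=
  if n ≠ [] ∧ PySem.Chars.isIn (PySem.Chars.lower n) st = true then false else true

theorem pvEvalA_and (st t : List Char) : pvEvalA st [("AND", t)] = pvAndOk st t := by
  simp only [pvEvalA, pvAndOk]
  split_ifs <;> simp_all

theorem pvEvalA_not (st t : List Char) : pvEvalA st [("NOT", t)] = pvNotOk st t := by
  simp only [pvEvalA, pvNotOk]
  split_ifs <;> simp_all

theorem pvEvalA_ite (st t : List Char) :
    pvEvalA st (if t ≠ [] then [("AND", t)] else []) = pvAndOk st t := by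
  split_ifs with h
  · exact pvEvalA_and st t
  · simp_all [pvEvalA, pvAndOk]

theorem pvStripNil : PySem.Chars.strip ([] : List Char) = [] := rfl

theorem pvDropWhile_semi (rest : List Char) (h : ';' ∈ rest) :
    rest.dropWhile (· != ';') = ';' :: (rest.dropWhile (· != ';')).drop 1 := by
  induction rest with
  | nil => simp at h
  | cons c cs ih =>
      by_cases hc : c = ';'
      · subst hc; simp
      · have hcs : ';' ∈ cs := by
          rcases List.mem_cons.mp h with h1 | h1
          · exact absurd h1.symm hc
          · exact h1
        simp only [List.dropWhile_cons]
        rw [if_pos (by simp only [bne_iff_ne, ne_eq]; exact hc)]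
        exact ih hcs

theorem pvTermOkB_bang (st cur neg : List Char) (hnb : '!' ∉ cur) :
    pvTermOkB st (cur ++ '!' :: neg)
      = (pvAndOk st (PySem.Chars.strip cur) && pvNotOk st (PySem.Chars.strip neg)) := by
  have hall : ∀ c ∈ cur, (c != '!') = true := by
    intro c hc; simp only [bne_iff_ne, ne_eq]; rintro rfl; exact hnb hc
  have htk : (cur ++ '!' :: neg).takeWhile (· != '!') = cur := by
    rw [List.takeWhile_append, if_pos (by rw [List.takeWhile_eq_self_iff.mpr hall])]
    simp
  have hdw : (cur ++ '!' :: neg).dropWhile (· != '!') = '!' :: neg := by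
    rw [List.dropWhile_append, if_pos (by simp [List.dropWhile_eq_nil_iff.mpr hall])]
    simp
  have hmem : '!' ∈ cur ++ '!' :: neg := List.mem_append.mpr (Or.inr (List.mem_cons_self))
  simp only [pvTermOkB, htk, hdw, if_pos hmem, List.drop_succ_cons, List.drop_zero,
    pvAndOk, pvNotOk]
  split_ifs <;> simp_all

theorem pvAll_ws (st cur rest : List Char) (h : PySem.Chars.strip cur = []) (hns : ';' ∉ cur) :
    (pvSplit1 ';' (cur ++ rest)).all (pvTermOkB st) = (pvSplit1 ';' rest).all (pvTermOkB st) := by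
  rw [pvSplit1_append ';' cur rest hns]
  rcases hne : pvSplit1 ';' rest with _ | ⟨x, tl⟩
  · exact absurd hne (pvSplit1_ne_nil ';' rest)
  · simp [pvTermOkB_ws st cur x h]

theorem pvMain_nil (st cur : List Char) (hnb : '!' ∉ cur) (hns : ';' ∉ cur) :
    pvEvalA st (pvParseA [] cur []) = (pvSplit1 ';' (cur ++ [])).all (pvTermOkB st) := by
  rw [List.append_nil, pvSplit1_char ';' cur,
    if_neg hns, List.takeWhile_eq_self_iff.mpr
      (by intro c hc; simp only [bne_iff_ne, ne_eq]; rintro rfl; exact hns hc)]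
  simp only [List.all_cons, List.all_nil, Bool.and_true]
  rw [pvTermOkB_no_bang st cur hnb]
  rw [show pvParseA [] cur []
        = (if PySem.Chars.strip cur ≠ [] then [("AND", PySem.Chars.strip cur)] else []) by
      simp [pvParseA]]
  exact pvEvalA_ite st _

theorem pvMain (st : List Char) : ∀ (n : Nat) (cs : List Char), cs.length ≤ n →
    ∀ (cur : List Char), '!' ∉ cur → ';' ∉ cur →
    pvEvalA st (pvParseA cs cur []) = (pvSplit1 ';' (cur ++ cs)).all (pvTermOkB st) := by
  intro n
  induction n with
  | zero =>
      intro cs hlen cur hnb hns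
      have : cs = [] := by cases cs <;> simp_all
      subst this
      exact pvMain_nil st cur hnb hns
  | succ f ih =>
      intro cs hlen cur hnb hns
      cases cs with
      | nil => exact pvMain_nil st cur hnb hns
      | cons c rest =>
          have hrest : rest.length ≤ f := by simpa using hlen
          by_cases hbang : c = '!'
          · subst hbang
            -- LHS
            rw [show pvParseA ('!' :: rest) cur []
                  = pvParseA (rest.dropWhile (· != ';')) []
                      ((if PySem.Chars.strip cur ≠ [] then [] ++ [("AND", PySem.Chars.strip cur)] else [])
                        ++ [("NOT", PySem.Chars.strip (rest.takeWhile (· != ';')))]) by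
                simp [pvParseA]]
            have hd : (rest.dropWhile (· != ';')).length ≤ f :=
              Nat.le_trans (List.length_dropWhile_le _ _) hrest
            rw [pvParseA_acc f _ hd]
            rw [pvEvalA_append, pvEvalA_append]
            simp only [List.nil_append]
            rw [pvEvalA_ite, pvEvalA_not]
            -- RHS
            rw [pvSplit1_append ';' cur _ hns]
            rw [show pvSplit1 ';' ('!' :: rest) = (pvSplit1 ';' rest).modifyHead ('!' :: ·) by
                simp [pvSplit1]]
            rw [pvSplit1_char ';' rest]
            simp only [List.modifyHead_cons, List.all_cons]
            rw [pvTermOkB_bang st cur _ hnb]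
            by_cases hsem : ';' ∈ rest
            · rw [if_pos hsem]
              have hdd := pvDropWhile_semi rest hsem
              rw [show pvParseA (rest.dropWhile (· != ';')) [] []
                    = pvParseA ((rest.dropWhile (· != ';')).drop 1) [] [] by
                  conv_lhs => rw [hdd]
                  simp [pvParseA, pvStripNil]]
              have hdd' : ((rest.dropWhile (· != ';')).drop 1).length ≤ f := by
                have h1 := List.length_dropWhile_le (· != ';') rest
                simp only [List.length_drop]
                omega
              rw [ih _ hdd' [] (by simp) (by simp)]
              simp only [List.nil_append]
            · rw [if_neg hsem]
              rw [show rest.dropWhile (· != ';') = [] from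
                  List.dropWhile_eq_nil_iff.mpr
                    (by intro x hx; simp only [bne_iff_ne, ne_eq]; rintro rfl; exact hsem hx)]
              rw [show pvParseA [] ([] : List Char) [] = [] by simp [pvParseA, pvStripNil]]
              simp [pvEvalA]
          · by_cases hsemi : c = ';'
            · subst hsemi
              -- RHS first
              rw [pvSplit1_append ';' cur _ hns]
              rw [show pvSplit1 ';' (';' :: rest) = [] :: pvSplit1 ';' rest by simp [pvSplit1]]
              simp only [List.modifyHead_cons, List.append_nil, List.all_cons]
              rw [pvTermOkB_no_bang st cur hnb]
              by_cases hstrip : PySem.Chars.strip cur ≠ []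
              · rw [show pvParseA (';' :: rest) cur []
                      = pvParseA rest [] ([] ++ [("AND", PySem.Chars.strip cur)]) by
                    simp [pvParseA, hstrip]]
                simp only [List.nil_append]
                rw [pvParseA_acc f _ hrest, pvEvalA_append, pvEvalA_and]
                rw [ih _ hrest [] (by simp) (by simp)]
                simp only [List.nil_append]
              · have hstrip' : PySem.Chars.strip cur = [] := not_ne_iff.mp hstrip
                rw [show pvParseA (';' :: rest) cur [] = pvParseA rest cur [] by
                    simp [pvParseA, hstrip']]
                rw [ih _ hrest cur hnb hns]
                rw [pvAll_ws st cur rest hstrip' hns]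
                simp [pvAndOk, hstrip']
            · rw [show pvParseA (c :: rest) cur [] = pvParseA rest (cur ++ [c]) [] by
                  simp [pvParseA, hbang, hsemi]]
              rw [ih _ hrest (cur ++ [c])
                  (by simp [hnb]; exact fun e => hbang e.symm)
                  (by simp [hns]; exact fun e => hsemi e.symm)]
              rw [List.append_assoc]
              rfl

theorem pvOrLoop_eq (st : List Char) (l : List (List Char)) :
    pvOrLoopA st l = l.any (fun p => (pvSplit1 ';' p).all (pvTermOkB st)) := by
  induction l with
  | nil => simp [pvOrLoopA]
  | cons p rest ih =>
      simp only [pvOrLoopA, List.any_cons]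
      rw [pvMain st p.length p (le_refl _) [] (by simp) (by simp)]
      simp only [List.nil_append]
      split_ifs with h
      · simp [h]
      · simp [h, ih]

-- ===== VERDICT (by name: the statement is the Claim_ definition above) =====
theorem evaluate_complex_pattern_py_spec : Claim_equal_evaluate_complex_pattern_py := by
  intro pattern style value _
  unfold Spec_evaluate_complex_pattern_py
  unfold evaluate_complex_pattern_py evaluate_complex_pattern_py_alt
  simp only [pvSplitOn_single]
  exact pvOrLoop_eq _ _
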